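-- pv_equiv track=rewrite | github.com/nico/hack | aoc/2019/16_2.py | step
-- ===== SOURCE A (Python) =====
-- def step(state):
--     start, step, sign = 0, 1, 1
--     new_state = [0] * len(state)
--     for i in range(len(state)):
--         s = 0
--         for k in range(start, len(state), 2*step):
--             s += sign * sum(state[k:k+step])
--             sign = -sign
--         start += 1
--         step += 1
--         sign = 1
--         new_state[i] = abs(s) % 10
--
--     return new_state
-- ===== SOURCE B (Python) =====
-- def step(state):
--     # Prefix sums make each contiguous block sum O(1); positive blocks start at
--     # i, i+4L, ... and negative blocks at i+2L, i+6L, ... (L = i+1), so the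
--     # alternating-sign inner scan of A disappears.
--     n = len(state)
--     pre = [0]
--     acc = 0
--     for v in state:
--         acc += v
--         pre.append(acc)
--     out = []
--     for i in range(n):
--         L = i + 1
--         pos = sum(pre[min(k + L, n)] - pre[k] for k in range(i, n, 4 * L))
--         neg = sum(pre[min(k + L, n)] - pre[k] for k in range(i + 2 * L, n, 4 * L))
--         out.append(abs(pos - neg) % 10)
--     return out
-- ===== Notes on version B (the rewrite author's own statement) =====
-- stated objective: faster
-- what changed: B builds a prefix-sum array once so each pattern block sum is O(1), and sums the positive blocks (start i, stride 4L) and negative blocks (start i+2L, stride 4L) separately instead of A's alternating-sign scan that re-sums each slice.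
import Mathlib
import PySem

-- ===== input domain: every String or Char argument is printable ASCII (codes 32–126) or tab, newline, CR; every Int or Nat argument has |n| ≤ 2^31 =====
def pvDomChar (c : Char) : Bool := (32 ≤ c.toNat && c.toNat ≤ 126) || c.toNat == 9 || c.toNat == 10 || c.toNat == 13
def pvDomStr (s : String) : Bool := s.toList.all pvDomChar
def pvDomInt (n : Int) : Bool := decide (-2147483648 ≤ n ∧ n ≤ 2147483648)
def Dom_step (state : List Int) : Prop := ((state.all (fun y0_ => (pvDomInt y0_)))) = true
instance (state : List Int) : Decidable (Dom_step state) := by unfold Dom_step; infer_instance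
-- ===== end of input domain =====

-- B replaces A's alternating-sign inner scan (which re-sums each slice) by a prefix-sum
-- array giving every block sum in O(1), summing positive and negative blocks separately.

-- ===== PORT A =====
-- literal port of A: the fold state carries (new_state, start, step, sign);
-- the loop index i satisfies 0 ≤ i < len(state), so 'set i.toNat' is Python's new_state[i] = …
def step (state : List Int) : List Int :=
  let n : Int := PySem.List.len state
  ((PySem.List.pyRange 0 n 1).foldl
    (fun (st : List Int × Int × Int × Int) i =>
      let p := (PySem.List.pyRange st.2.1 n (2 * st.2.2.1)).foldl
        (fun (q : Int × Int) k =>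
          (q.1 + q.2 * (PySem.List.slice state (some k) (some (k + st.2.2.1))).sum, -q.2))
        (0, st.2.2.2)
      (st.1.set i.toNat (PySem.Int.mod |p.1| 10), st.2.1 + 1, st.2.2.1 + 1, 1))
    (List.replicate state.length 0, 0, 1, 1)).1

-- ===== PORT B =====
-- literal port of Source B; pre has length n+1 and every index used (k and min(k+L,n), with
-- 0 ≤ i ≤ k < n) is in range, so 'pyGetD … 0' is exactly Python's pre[...]
def step_alt (state : List Int) : List Int :=
  let n : Int := PySem.List.len state
  let pre := (state.foldl (fun (p : List Int × Int) v => (p.1 ++ [p.2 + v], p.2 + v)) ([0], 0)).1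
  (PySem.List.pyRange 0 n 1).foldl
    (fun out i =>
      let L := i + 1
      let pos := ((PySem.List.pyRange i n (4 * L)).map
        (fun k => PySem.List.pyGetD pre (min (k + L) n) 0 - PySem.List.pyGetD pre k 0)).sum
      let neg := ((PySem.List.pyRange (i + 2 * L) n (4 * L)).map
        (fun k => PySem.List.pyGetD pre (min (k + L) n) 0 - PySem.List.pyGetD pre k 0)).sum
      out ++ [PySem.Int.mod |pos - neg| 10]) []

-- ===== PRECONDITION & SPEC =====
def Spec_step (state : List Int) (out : List Int) : Prop := out = step_alt state
instance (state : List Int) (out : List Int) : Decidable (Spec_step state out) := by unfold Spec_step; infer_instance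

-- ===== CLAIM (what is proved, stated in full; the proofs are below) =====
def Claim_equal_step : Prop := ∀ (state : List Int), Dom_step state → Spec_step state (step state)

-- ===== LEMMAS AND PROOFS =====

-- alternating sum x0 - x1 + x2 - …
def pvAlt : List Int → Int
  | [] => 0
  | x :: xs => x - pvAlt xs

-- A's per-index inner loop (at index i: start = i, step = i+1, sign = 1)
def pvOutA (state : List Int) (i : Int) : Int :=
  PySem.Int.mod
    |((PySem.List.pyRange i (PySem.List.len state) (2 * (i + 1))).foldl
        (fun (q : Int × Int) k =>
          (q.1 + q.2 * (PySem.List.slice state (some k) (some (k + (i + 1)))).sum, -q.2))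
        (0, 1)).1| 10

-- prefix sums
def pvP (state : List Int) (j : Nat) : Int := (state.take j).sum

-- B's per-index value, with pre[·] rewritten to prefix sums
def pvOutB (state : List Int) (i : Int) : Int :=
  PySem.Int.mod
    |((PySem.List.pyRange i (state.length : Int) (4 * (i + 1))).map
        (fun k => pvP state (min (k + (i + 1)) (state.length : Int)).toNat - pvP state k.toNat)).sum
      - ((PySem.List.pyRange (i + 2 * (i + 1)) (state.length : Int) (4 * (i + 1))).map
        (fun k => pvP state (min (k + (i + 1)) (state.length : Int)).toNat - pvP state k.toNat)).sum| 10

lemma pyRange_pos_eq_nil {a b s : ℤ} (hs : 0 < s) (h : b ≤ a) :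
    PySem.List.pyRange a b s = [] := by
  rw [PySem.List.pyRange_of_pos _ _ hs, if_neg (not_lt.mpr h)]
  simp

lemma pyRange_pos_cons {a b s : ℤ} (hs : 0 < s) (h : a < b) :
    PySem.List.pyRange a b s = a :: PySem.List.pyRange (a + s) b s := by
  rw [PySem.List.pyRange_of_pos _ _ hs, PySem.List.pyRange_of_pos _ _ hs, if_pos h]
  by_cases h2 : a + s < b
  · rw [if_pos h2]
    have hq : 0 ≤ (b - a - 1) / s := Int.ediv_nonneg (by omega) (by omega)
    have e1 : b - a + s - 1 = (b - a - 1) + 1 * s := by ring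
    have e2 : b - (a + s) + s - 1 = b - a - 1 := by ring
    rw [e1, Int.add_mul_ediv_right _ _ (by omega), e2]
    have : ((b - a - 1) / s + 1).toNat = ((b - a - 1) / s).toNat + 1 := by omega
    rw [this, List.range_succ_eq_map]
    simp only [List.map_cons, List.map_map, Nat.cast_zero, mul_zero, add_zero]
    congr 1
    apply List.map_congr_left
    intro k _
    simp only [Function.comp_apply]
    push_cast
    ring
  · rw [if_neg h2]
    have : (b - a + s - 1) / s = 1 := by
      have h1 : 1 ≤ (b - a + s - 1) / s := (Int.le_ediv_iff_mul_le hs).mpr (by omega)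
      have h2b : (b - a + s - 1) / s < 2 := (Int.ediv_lt_iff_lt_mul hs).mpr (by omega)
      omega
    rw [this]
    simp

lemma foldl_altsign (f : Int → Int) (l : List Int) :
    ∀ (s sg : Int),
      (l.foldl (fun (q : Int × Int) k => (q.1 + q.2 * f k, -q.2)) (s, sg)).1
        = s + sg * pvAlt (l.map f) := by
  induction l with
  | nil => intro s sg; simp [pvAlt]
  | cons x t ih => intro s sg; simp only [List.foldl_cons, List.map_cons, pvAlt, ih]; ring

lemma alt_split (f : Int → Int) {d : ℤ} (hd : 0 < d) :
    ∀ (m : ℕ) (a b : ℤ), (b - a).toNat ≤ m →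
      pvAlt ((PySem.List.pyRange a b d).map f)
        = ((PySem.List.pyRange a b (2 * d)).map f).sum
          - ((PySem.List.pyRange (a + d) b (2 * d)).map f).sum := by
  intro m
  induction m with
  | zero =>
    intro a b hm
    have hba : b ≤ a := by omega
    rw [pyRange_pos_eq_nil hd hba, pyRange_pos_eq_nil (by omega) hba,
      pyRange_pos_eq_nil (by omega) (by omega)]
    simp [pvAlt]
  | succ m ih =>
    intro a b hm
    rcases le_or_gt b a with hba | hab
    · rw [pyRange_pos_eq_nil hd hba, pyRange_pos_eq_nil (by omega) hba,
        pyRange_pos_eq_nil (by omega) (by omega)]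
      simp [pvAlt]
    · rw [pyRange_pos_cons hd hab, pyRange_pos_cons (by omega : (0:ℤ) < 2 * d) hab]
      simp only [List.map_cons, pvAlt, List.sum_cons]
      rw [ih (a + d) b (by omega)]
      have e : a + d + d = a + 2 * d := by ring
      rw [e]
      ring

lemma preFold (l : List Int) :
    ∀ (acc : List Int) (c : Int),
      (l.foldl (fun (p : List Int × Int) v => (p.1 ++ [p.2 + v], p.2 + v)) (acc, c)).1
        = acc ++ (List.range l.length).map (fun j => c + (l.take (j + 1)).sum) := by
  induction l with
  | nil => intro acc c; simp
  | cons v t ih =>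
    intro acc c
    simp only [List.foldl_cons, ih, List.length_cons, List.range_succ_eq_map,
      List.map_cons, List.map_map, List.take_succ_cons, List.sum_cons]
    simp only [List.take_zero, List.sum_nil, add_zero, List.append_assoc,
      List.singleton_append]
    congr 1
    congr 1
    apply List.map_congr_left
    intro j _
    simp only [Function.comp_apply, Nat.succ_eq_add_one]
    ring

lemma take_sum_clamp (state : List Int) (m : ℕ) :
    pvP state m = pvP state (min m state.length) := by
  unfold pvP
  rcases le_or_gt m state.length with h | h
  · rw [min_eq_left h]
  · rw [min_eq_right (by omega), List.take_of_length_le (by omega),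
      List.take_of_length_le (by omega)]

lemma pre_getD (state : List Int) (j : ℤ) (h0 : 0 ≤ j) (h1 : j ≤ state.length) :
    PySem.List.pyGetD
      ((state.foldl (fun (p : List Int × Int) v => (p.1 ++ [p.2 + v], p.2 + v)) (([0], 0) : List Int × Int)).1) j 0
      = pvP state j.toNat := by
  rw [preFold]
  have hpre : ([(0:ℤ)] ++ (List.range state.length).map (fun j => 0 + (state.take (j + 1)).sum))
      = (List.range (state.length + 1)).map (fun j => pvP state j) := by
    rw [List.range_succ_eq_map, List.map_cons, List.map_map]
    simp [pvP, Function.comp]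
  rw [hpre, PySem.List.pyGetD_eq_getElem _ _ h0 (by simp; omega)]
  rw [List.getElem_map, List.getElem_range]

lemma slice_sum (state : List Int) (k L : ℤ) (hk : 0 ≤ k) (hL : 0 ≤ L) :
    (PySem.List.slice state (some k) (some (k + L))).sum
      = pvP state (min (k + L) state.length).toNat - pvP state k.toNat := by
  rw [PySem.List.slice_toNat _ hk (by omega)]
  have e : (k + L).toNat - k.toNat = L.toNat := by omega
  rw [e]
  have h1 : pvP state (k.toNat + L.toNat)
      = pvP state k.toNat + (List.take L.toNat (List.drop k.toNat state)).sum := by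
    unfold pvP
    rw [List.take_add, List.sum_append]
  have h2 : (min (k + L) state.length).toNat = min (k.toNat + L.toNat) state.length := by omega
  rw [h2, ← take_sum_clamp, h1]
  ring

lemma A_loop (state : List Int) :
    ∀ (m : ℕ) (a : ℤ) (ns : List Int),
      (PySem.List.pyRange a (a + m) 1).foldl
        (fun (st : List Int × Int × Int × Int) i =>
          (st.1.set i.toNat (PySem.Int.mod
            |((PySem.List.pyRange st.2.1 (PySem.List.len state) (2 * st.2.2.1)).foldl
              (fun (q : Int × Int) k =>
                (q.1 + q.2 * (PySem.List.slice state (some k) (some (k + st.2.2.1))).sum, -q.2))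
              (0, st.2.2.2)).1| 10), st.2.1 + 1, st.2.2.1 + 1, 1))
        (ns, a, a + 1, 1)
      = ((PySem.List.pyRange a (a + m) 1).foldl
          (fun t i => t.set i.toNat (pvOutA state i)) ns, a + m, a + m + 1, 1) := by
  intro m
  induction m with
  | zero =>
    intro a ns
    rw [show a + ((0:ℕ):ℤ) = a by simp]
    rw [PySem.List.pyRange_one_eq_nil (le_refl a)]
    simp
  | succ m ih =>
    intro a ns
    have hab : a < a + ((m:ℤ) + 1) := by omega
    rw [show a + ((Nat.succ m : ℕ):ℤ) = a + ((m:ℤ) + 1) by push_cast; ring]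
    rw [PySem.List.pyRange_one_cons hab]
    simp only [List.foldl_cons]
    have e : a + ((m:ℤ) + 1) = (a + 1) + (m:ℤ) := by ring
    rw [e]
    exact ih (a + 1) _

lemma sets_eq_map (f : ℤ → ℤ) :
    ∀ (k : ℕ) (l : List Int), k ≤ l.length →
      (PySem.List.pyRange 0 k 1).foldl (fun t i => t.set i.toNat (f i)) l
        = (PySem.List.pyRange 0 k 1).map f ++ l.drop k := by
  intro k
  induction k with
  | zero =>
    intro l _
    rw [PySem.List.pyRange_one_eq_nil (by simp)]
    simp
  | succ k ih =>
    intro l hk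
    have e : ((k + 1 : ℕ) : ℤ) = (k : ℤ) + 1 := by push_cast; ring
    rw [e, PySem.List.pyRange_one_succ_right (by positivity)]
    rw [List.foldl_append, List.map_append, ih l (by omega)]
    have hlen : ((PySem.List.pyRange 0 k 1).map f).length = k := by
      rw [List.length_map, PySem.List.length_pyRange_one]
      omega
    simp only [List.foldl_cons, List.foldl_nil, List.map_cons, List.map_nil]
    rw [List.set_append, if_neg (by omega)]
    rw [hlen, Int.toNat_natCast]
    have hd : l.drop k = l[k] :: l.drop (k + 1) := List.drop_eq_getElem_cons (by omega)
    rw [hd]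
    simp
    rw [hd, List.set_cons_zero]

lemma step_eq_map (state : List Int) :
    step state = (PySem.List.pyRange 0 (state.length : Int) 1).map (pvOutA state) := by
  simp only [step, PySem.List.len_eq]
  have h := A_loop state state.length 0 (List.replicate state.length 0)
  simp only [zero_add, PySem.List.len_eq] at h
  rw [h]
  rw [sets_eq_map (pvOutA state) state.length (List.replicate state.length 0) (by simp)]
  simp

lemma stepalt_eq_map (state : List Int) :
    step_alt state = (PySem.List.pyRange 0 (state.length : Int) 1).map (pvOutB state) := by
  simp only [step_alt, PySem.List.len_eq]
  rw [PySem.List.foldl_append_singleton_eq_map]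
  rw [List.nil_append]
  apply List.map_congr_left
  intro i hi
  obtain ⟨hi0, hin⟩ := (PySem.List.mem_pyRange_one).1 hi
  unfold pvOutB
  congr 2
  congr 1
  · refine congrArg List.sum (List.map_congr_left ?_)
    intro k hk
    obtain ⟨hk1, hk2, -⟩ := (PySem.List.mem_pyRange_iff_of_pos (by omega) k).1 hk
    rw [pre_getD state _ (by omega) (by omega), pre_getD state _ (by omega) (by omega)]
  · refine congrArg List.sum (List.map_congr_left ?_)
    intro k hk
    obtain ⟨hk1, hk2, -⟩ := (PySem.List.mem_pyRange_iff_of_pos (by omega) k).1 hk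
    rw [pre_getD state _ (by omega) (by omega), pre_getD state _ (by omega) (by omega)]

lemma outA_eq_outB (state : List Int) (i : Int) (h0 : 0 ≤ i) :
    pvOutA state i = pvOutB state i := by
  unfold pvOutA pvOutB
  simp only [PySem.List.len_eq]
  rw [foldl_altsign]
  rw [alt_split _ (by omega : (0:ℤ) < 2 * (i + 1)) ((state.length : Int) - i).toNat i
    (state.length : Int) (le_refl _)]
  rw [show (2:ℤ) * (2 * (i + 1)) = 4 * (i + 1) by ring]
  have e1 : ((PySem.List.pyRange i (state.length : Int) (4 * (i + 1))).map
        (fun k => (PySem.List.slice state (some k) (some (k + (i + 1)))).sum))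
      = ((PySem.List.pyRange i (state.length : Int) (4 * (i + 1))).map
        (fun k => pvP state (min (k + (i + 1)) (state.length : Int)).toNat - pvP state k.toNat)) := by
    apply List.map_congr_left
    intro k hk
    obtain ⟨hk1, -, -⟩ := (PySem.List.mem_pyRange_iff_of_pos (by omega) k).1 hk
    exact slice_sum state k (i + 1) (by omega) (by omega)
  have e2 : ((PySem.List.pyRange (i + 2 * (i + 1)) (state.length : Int) (4 * (i + 1))).map
        (fun k => (PySem.List.slice state (some k) (some (k + (i + 1)))).sum))
      = ((PySem.List.pyRange (i + 2 * (i + 1)) (state.length : Int) (4 * (i + 1))).map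
        (fun k => pvP state (min (k + (i + 1)) (state.length : Int)).toNat - pvP state k.toNat)) := by
    apply List.map_congr_left
    intro k hk
    obtain ⟨hk1, -, -⟩ := (PySem.List.mem_pyRange_iff_of_pos (by omega) k).1 hk
    exact slice_sum state k (i + 1) (by omega) (by omega)
  rw [show i + (2 * (i + 1)) = i + 2 * (i + 1) from rfl, e1, e2]
  norm_num

-- ===== VERDICT (by name: the statement is the Claim_ definition above) =====
theorem step_spec : Claim_equal_step := by
  unfold Claim_equal_step Spec_step
  intro state _
  rw [step_eq_map, stepalt_eq_map]
  apply List.map_congr_left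
  intro i hi
  obtain ⟨hi0, -⟩ := (PySem.List.mem_pyRange_one).1 hi
  exact outA_eq_outB state i hi0
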